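-- pv_equiv track=rewrite | github.com/ArcProjet/ARC | primitive.py | extendColumn50_1
-- ===== SOURCE A (Python) =====
-- def gridCopy(grid):
--     res = [[0 for _ in range(len(grid[0]))] for _ in range(len(grid))]
--     for i in range(0, len(grid)):
--         for j in range(0, len(grid[i])):
--             res[i][j] = grid[i][j]
--     return res
--
-- def extendColumn50_1(grid):
--  res = gridCopy(grid)
--  column = int((len(res[0])-1)*0.5)
--  for i in range(0, len(res)):
--    for j in range(0, len(res[0])):
--        if(j == column):
--          res[i][j] = 1
--  return res
-- ===== SOURCE B (Python) =====
-- def extendColumn50_1(grid):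
--     m = len(grid)
--     w = len(grid[0])
--     cols = [[grid[i][j] if j < len(grid[i]) else 0 for i in range(m)]
--             for j in range(w)]
--     if w > 0:
--         cols[(w - 1) // 2] = [1] * m
--     return [[cols[j][i] for j in range(w)] for i in range(m)]
-- ===== Notes on version B (the rewrite author's own statement) =====
-- stated objective: alternative
-- what changed: B works column-wise: it builds the transposed zero-padded grid, replaces the middle column with [1]*m in one assignment, and transposes back, instead of A's cell-by-cell copy into a zero grid followed by a nested row-and-column scan with a j==column test.
import Mathlib
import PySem

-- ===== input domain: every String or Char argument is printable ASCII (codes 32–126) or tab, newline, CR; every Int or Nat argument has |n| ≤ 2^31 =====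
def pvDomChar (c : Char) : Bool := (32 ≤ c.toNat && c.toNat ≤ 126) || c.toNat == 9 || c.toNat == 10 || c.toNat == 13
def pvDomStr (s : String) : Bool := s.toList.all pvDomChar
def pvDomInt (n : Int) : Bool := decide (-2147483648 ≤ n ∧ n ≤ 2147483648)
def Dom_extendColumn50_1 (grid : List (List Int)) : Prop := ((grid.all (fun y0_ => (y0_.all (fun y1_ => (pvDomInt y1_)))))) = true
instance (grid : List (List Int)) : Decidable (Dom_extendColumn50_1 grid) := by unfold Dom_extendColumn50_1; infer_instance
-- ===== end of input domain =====

-- B works column-wise (build the transposed zero-padded grid, replace the middle column by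
-- a list of ones, transpose back) instead of A's cell-by-cell copy plus nested scan; objective: alternative.


-- ===== PORT A =====
-- gridCopy: res = zero grid of shape len(grid) × len(grid[0]), then res[i][j] = grid[i][j].
-- (grid[0] is grid.headD []: Pre_ guarantees grid ≠ [], so this is exact there.)
def gridCopyA (grid : List (List Int)) : List (List Int) :=
  let res := List.replicate grid.length (List.replicate (grid.headD []).length (0 : Int))
  (List.range grid.length).foldl (fun res i =>
    (List.range (grid.getD i []).length).foldl (fun res j =>
      res.modify i (fun row => row.set j ((grid.getD i []).getD j 0))) res) res

-- column = int((len(res[0])-1)*0.5): the float product is exact (|w| ≤ 2^31 on Dom) and int()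
-- truncates toward zero, which for w ≥ 1 is (w-1)/2 in Nat and for w = 0 gives int(-0.5) = 0 = (0-1)/2 in Nat.
def extendColumn50_1 (grid : List (List Int)) : List (List Int) :=
  let res := gridCopyA grid
  let column := ((res.headD []).length - 1) / 2
  let w0 := (res.headD []).length
  (List.range res.length).foldl (fun res i =>
    (List.range w0).foldl (fun res j =>
      if j = column then res.modify i (fun row => row.set j 1) else res) res) res

-- ===== PORT B =====
-- column j of the zero-padded grid is [grid[i][j] if j < len(grid[i]) else 0 for i in range(m)];
-- cols[(w-1)//2] is replaced by [1]*m, then the double comprehension transposes back.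
def extendColumn50_1_alt (grid : List (List Int)) : List (List Int) :=
  let m := grid.length
  let w := (grid.headD []).length
  let cols := (List.range w).map (fun j => (List.range m).map (fun i =>
      if j < (grid.getD i []).length then (grid.getD i []).getD j 0 else 0))
  let cols := if 0 < w then cols.set ((w - 1) / 2) (List.replicate m (1 : Int)) else cols
  (List.range m).map (fun i => (List.range w).map (fun j => (cols.getD j []).getD i 0))

-- ===== PRECONDITION & SPEC =====
-- Pre_ excludes exactly the inputs where A raises IndexError: the empty grid (grid[0]) and grids
-- with a row longer than row 0 (writing past the end of res[i]).
def Pre_extendColumn50_1 (grid : List (List Int)) : Prop :=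
  grid ≠ [] ∧ ∀ row ∈ grid, row.length ≤ (grid.headD []).length
instance (grid : List (List Int)) : Decidable (Pre_extendColumn50_1 grid) := by
  unfold Pre_extendColumn50_1; infer_instance

def pvWitness_extendColumn50_1 : List (List Int) := [[1, 2, 3], [4, 5]]

def Spec_extendColumn50_1 (grid : List (List Int)) (out : List (List Int)) : Prop := out = extendColumn50_1_alt grid
instance (grid : List (List Int)) (out : List (List Int)) : Decidable (Spec_extendColumn50_1 grid out) := by unfold Spec_extendColumn50_1; infer_instance

-- ===== CLAIM (what is proved, stated in full; the proofs are below) =====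
def Claim_equal_extendColumn50_1 : Prop := ∀ (grid : List (List Int)), Dom_extendColumn50_1 grid → Pre_extendColumn50_1 grid → Spec_extendColumn50_1 grid (extendColumn50_1 grid)

-- ===== LEMMAS AND PROOFS =====

-- a fold of row-i modifications collects into one modification of row i
theorem foldl_modify_collect (L : List Nat) (i : Nat) (h : Nat → List Int → List Int)
    (res : List (List Int)) :
    L.foldl (fun r j => r.modify i (h j)) res
      = res.modify i (fun row => L.foldl (fun row j => h j row) row) := by
  induction L generalizing res with
  | nil => exact (List.modify_id i res).symm
  | cons a L ih =>
    simp only [List.foldl_cons, ih, List.modify_modify_eq]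
    rfl

-- the outer loop over row indices, read back pointwise
theorem foldl_range_modify_get (g : Nat → List Int → List Int) (n : Nat)
    (res : List (List Int)) (k : Nat) :
    ((List.range n).foldl (fun r i => r.modify i (g i)) res)[k]?
      = if k < n then (res[k]?).map (g k) else res[k]? := by
  induction n with
  | zero => simp
  | succ n ih =>
    rw [List.range_succ, List.foldl_append, List.foldl_cons, List.foldl_nil,
      List.getElem?_modify, ih]
    rcases Nat.lt_trichotomy k n with hk | hk | hk
    · simp [hk, Nat.lt_succ_of_lt hk, Nat.ne_of_gt hk]
    · subst hk
      simp
    · have h1 : ¬ k < n := by omega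
      have h2 : ¬ k < n + 1 := by omega
      simp [h1, h2, Nat.ne_of_lt hk]

-- the inner copy loop fills a zero row with the source row's entries
theorem rowFill (r : List Int) (w m : Nat) (hm : m ≤ r.length) (hw : m ≤ w) :
    (List.range m).foldl (fun row j => row.set j (r.getD j 0)) (List.replicate w (0 : Int))
      = r.take m ++ List.replicate (w - m) 0 := by
  induction m with
  | zero => simp
  | succ m ih =>
    rw [List.range_succ, List.foldl_append, List.foldl_cons, List.foldl_nil,
      ih (by omega) (by omega), List.set_append]
    have hlt : m < r.length := by omega
    have hlen : (r.take m).length = m := by simp; omega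
    have hnotlt : ¬ m < (r.take m).length := by omega
    rw [if_neg hnotlt, hlen, Nat.sub_self]
    have hrep : w - m = (w - (m + 1)) + 1 := by omega
    rw [hrep, List.replicate_succ, List.set_cons_zero]
    have hgd : r.getD m 0 = r[m] := by simp [List.getD, List.getElem?_eq_getElem hlt]
    rw [hgd, List.take_add_one, List.getElem?_eq_getElem hlt, Option.toList_some,
      List.append_assoc, List.singleton_append]

-- the inner column loop of A, acting on one row
theorem colSet (w c : Nat) (row : List Int) :
    (List.range w).foldl (fun row j => if j = c then row.set j (1 : Int) else row) row
      = if c < w then row.set c 1 else row := by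
  induction w with
  | zero => simp
  | succ w ih =>
    rw [List.range_succ, List.foldl_append, List.foldl_cons, List.foldl_nil, ih]
    rcases Nat.lt_trichotomy c w with hk | hk | hk
    · simp [hk, Nat.lt_succ_of_lt hk, Nat.ne_of_gt hk]
    · subst hk
      simp
    · have h1 : ¬ c < w := by omega
      have h2 : ¬ c < w + 1 := by omega
      simp [h1, h2, Nat.ne_of_lt hk]

-- gridCopyA, read back pointwise: row k is grid[k] padded with zeros up to width w
theorem gridCopyA_get (grid : List (List Int))
    (hP : ∀ row ∈ grid, row.length ≤ (grid.headD []).length) (k : Nat) :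
    (gridCopyA grid)[k]?
      = (grid[k]?).map (fun row =>
          row ++ List.replicate ((grid.headD []).length - row.length) 0) := by
  unfold gridCopyA
  simp only
  have hcollect : ∀ (res : List (List Int)) (i : Nat),
      (List.range (grid.getD i []).length).foldl (fun res j =>
        res.modify i (fun row => row.set j ((grid.getD i []).getD j 0))) res
      = res.modify i (fun row =>
          (List.range (grid.getD i []).length).foldl
            (fun row j => row.set j ((grid.getD i []).getD j 0)) row) := by
    intro res i
    exact foldl_modify_collect _ _ _ _
  rw [PySem.List.foldl_congr_mem _ _ _ _ (fun res i _ => hcollect res i)]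
  rw [foldl_range_modify_get]
  by_cases hk : k < grid.length
  · rw [if_pos hk, List.getElem?_replicate, if_pos hk,
      List.getElem?_eq_getElem hk]
    simp only [Option.map_some]
    have hget : grid.getD k [] = grid[k] := by
      simp [List.getD, List.getElem?_eq_getElem hk]
    rw [hget,
      rowFill grid[k] (grid.headD []).length grid[k].length le_rfl
        (hP _ (grid.getElem_mem hk)), List.take_length]
  · rw [if_neg hk, List.getElem?_replicate, if_neg hk,
      List.getElem?_eq_none (by omega)]
    rfl

theorem foldl_modify_len (L : List Nat) (g : Nat → List Int → List Int)
    (res : List (List Int)) :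
    (L.foldl (fun r i => r.modify i (g i)) res).length = res.length := by
  induction L generalizing res with
  | nil => rfl
  | cons a L ih => rw [List.foldl_cons, ih, List.length_modify]

theorem gridCopyA_len (grid : List (List Int)) :
    (gridCopyA grid).length = grid.length := by
  unfold gridCopyA
  simp only
  rw [PySem.List.foldl_congr_mem _ _ _ _
    (fun res i _ => foldl_modify_collect (List.range (grid.getD i []).length) i
      (fun j row => row.set j ((grid.getD i []).getD j 0)) res)]
  rw [foldl_modify_len, List.length_replicate]

-- A's inner column loop over one grid row collects into one row modification
theorem colLoop_collect (w0 column i : Nat) (res : List (List Int)) :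
    (List.range w0).foldl
        (fun r j => if j = column then r.modify i (fun row => row.set j (1 : Int)) else r) res
      = res.modify i (fun row =>
          (List.range w0).foldl (fun row j => if j = column then row.set j (1 : Int) else row) row) := by
  have hstep : ∀ (r : List (List Int)), ∀ j ∈ List.range w0,
      (if j = column then r.modify i (fun row => row.set j (1 : Int)) else r)
        = r.modify i (fun row => if j = column then row.set j (1 : Int) else row) := by
    intro r j _
    by_cases h : j = column
    · simp [h]
    · simp only [h, if_false]
      exact (List.modify_id i r).symm
  rw [PySem.List.foldl_congr_mem _ _ _ _ hstep]
  exact foldl_modify_collect _ _ _ _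

-- the head row of the copy has the full width
theorem gridCopyA_head_len (grid : List (List Int)) (hne : grid ≠ [])
    (hP : ∀ row ∈ grid, row.length ≤ (grid.headD []).length) :
    ((gridCopyA grid).headD []).length = (grid.headD []).length := by
  rw [List.headD_eq_head?, List.head?_eq_getElem?, gridCopyA_get grid hP 0]
  cases grid with
  | nil => exact absurd rfl hne
  | cons g0 t =>
    have h0 : g0.length ≤ ((g0 :: t).headD []).length := hP g0 List.mem_cons_self
    simp at h0 ⊢

-- A, read back pointwise
theorem a_get (grid : List (List Int)) (hne : grid ≠ [])
    (hP : ∀ row ∈ grid, row.length ≤ (grid.headD []).length) (k : Nat) :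
    (extendColumn50_1 grid)[k]?
      = (grid[k]?).map (fun row =>
          let w := (grid.headD []).length
          let padded := row ++ List.replicate (w - row.length) (0 : Int)
          if (w - 1) / 2 < w then padded.set ((w - 1) / 2) 1 else padded) := by
  unfold extendColumn50_1
  simp only
  rw [PySem.List.foldl_congr_mem _ _ _ _
    (fun res i _ => colLoop_collect ((gridCopyA grid).headD []).length
      ((((gridCopyA grid).headD []).length - 1) / 2) i res)]
  rw [foldl_range_modify_get, gridCopyA_len, gridCopyA_head_len grid hne hP]
  by_cases hk : k < grid.length
  · rw [if_pos hk, gridCopyA_get grid hP k, List.getElem?_eq_getElem hk]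
    simp only [Option.map]
    rw [colSet]
  · rw [if_neg hk, gridCopyA_get grid hP k,
      List.getElem?_eq_none (by omega)]
    rfl

-- B's output row i, for i < m: transposing back reads cell (j, i) of cols for each j < w
theorem alt_row (grid : List (List Int)) (hP : ∀ row ∈ grid, row.length ≤ (grid.headD []).length)
    (k : Nat) (hk : k < grid.length) :
    (List.range (grid.headD []).length).map (fun j =>
        (((if 0 < (grid.headD []).length then
            ((List.range (grid.headD []).length).map (fun j => (List.range grid.length).map (fun i =>
              if j < (grid.getD i []).length then (grid.getD i []).getD j 0 else 0))).set
              (((grid.headD []).length - 1) / 2) (List.replicate grid.length (1 : Int))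
          else
            ((List.range (grid.headD []).length).map (fun j => (List.range grid.length).map (fun i =>
              if j < (grid.getD i []).length then (grid.getD i []).getD j 0 else 0))))).getD j []).getD k 0)
      = (let w := (grid.headD []).length
         let padded := grid[k] ++ List.replicate (w - grid[k].length) (0 : Int)
         if (w - 1) / 2 < w then padded.set ((w - 1) / 2) 1 else padded) := by
  set w := (grid.headD []).length with hw
  set c := (w - 1) / 2 with hc
  have hrowlen : grid[k].length ≤ w := hP _ (grid.getElem_mem hk)
  have hpadlen : (grid[k] ++ List.replicate (w - grid[k].length) (0 : Int)).length = w := by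
    simp; omega
  by_cases hpos : 0 < w
  · have hcw : c < w := by omega
    rw [if_pos hpos, if_pos hcw]
    apply List.ext_getElem
    · simp [hpadlen]
    · intro j hj _
      have hjw : j < w := by simpa using hj
      simp only [List.getElem_map, List.getElem_range]
      have hcolslen : (((List.range w).map (fun j => (List.range grid.length).map (fun i =>
          if j < (grid.getD i []).length then (grid.getD i []).getD j 0 else 0))).set c
          (List.replicate grid.length (1 : Int))).length = w := by simp
      have hjw' : j < (((List.range w).map (fun j => (List.range grid.length).map (fun i =>
          if j < (grid.getD i []).length then (grid.getD i []).getD j 0 else 0))).set c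
          (List.replicate grid.length (1 : Int))).length := by omega
      rw [List.getD_eq_getElem _ _ hjw', List.getElem_set]
      have hgk : grid.getD k [] = grid[k] := by
        simp [List.getD, List.getElem?_eq_getElem hk]
      by_cases hjc : c = j
      · subst hjc
        rw [if_pos rfl, List.getD_eq_getElem _ _ (by simpa using hk),
          List.getElem_replicate, List.getElem_set_self (by omega)]
      · rw [if_neg hjc, List.getElem_map, List.getElem_range]
        have hklt : k < ((List.range grid.length).map (fun i =>
            if j < (grid.getD i []).length then (grid.getD i []).getD j 0 else 0)).length := by
          simpa using hk
        rw [List.getD_eq_getElem _ _ hklt, List.getElem_map, List.getElem_range,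
          List.getElem_set, if_neg (by omega : ¬ c = j), hgk]
        by_cases hjr : j < grid[k].length
        · rw [if_pos hjr, List.getElem_append_left hjr,
            List.getD_eq_getElem _ _ hjr]
        · rw [if_neg hjr, List.getElem_append_right (by omega), List.getElem_replicate]
  · have hw0 : w = 0 := by omega
    have hr0 : grid[k] = [] := List.eq_nil_of_length_eq_zero (by omega)
    simp [hw0, hr0]

-- ===== VERDICT (by name: the statement is the Claim_ definition above) =====
theorem extendColumn50_1_spec : Claim_equal_extendColumn50_1 := by
  intro grid _ hpre
  obtain ⟨hne, hP⟩ := hpre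
  show extendColumn50_1 grid = extendColumn50_1_alt grid
  apply List.ext_getElem?
  intro k
  rw [a_get grid hne hP k]
  unfold extendColumn50_1_alt
  simp only
  rw [List.getElem?_map]
  by_cases hk : k < grid.length
  · rw [List.getElem?_range hk, List.getElem?_eq_getElem hk]
    exact congrArg some (alt_row grid hP k hk).symm
  · rw [List.getElem?_eq_none (l := List.range grid.length) (by simpa using hk),
      List.getElem?_eq_none (by omega)]
    rfl
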